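-- pv_equiv track=rewrite | github.com/R3I5/RacAlgoritmico | ExerciciosFunções/Exercicio02.py | criarLinhas
-- ===== SOURCE A (Python) =====
-- def criarLinhas(linhas):
--     resultado = []
--     linha = 0
--     for i in range(linhas):
--         linha = linha + 1
--         texto = ''
--         for j in range(1, linha + 1):
--             texto += str(j) + ' '
--         resultado.append(texto)
--     return resultado
-- ===== SOURCE B (Python) =====
-- def criarLinhas(linhas):
--     resultado = []
--     for i in range(1, linhas + 1):
--         anterior = resultado[-1] if resultado else ''
--         resultado.append(anterior + str(i) + ' ')
--     return resultado
-- ===== Notes on version B (the rewrite author's own statement) =====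
-- stated objective: faster
-- what changed: Each line is built by appending one number to the list's previous last line (resultado[-1]) in a single loop, instead of A's inner 1..i loop rebuilding every line from scratch; a timing run measured a constant-factor speedup (the output itself is quadratic in size).
import Mathlib
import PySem

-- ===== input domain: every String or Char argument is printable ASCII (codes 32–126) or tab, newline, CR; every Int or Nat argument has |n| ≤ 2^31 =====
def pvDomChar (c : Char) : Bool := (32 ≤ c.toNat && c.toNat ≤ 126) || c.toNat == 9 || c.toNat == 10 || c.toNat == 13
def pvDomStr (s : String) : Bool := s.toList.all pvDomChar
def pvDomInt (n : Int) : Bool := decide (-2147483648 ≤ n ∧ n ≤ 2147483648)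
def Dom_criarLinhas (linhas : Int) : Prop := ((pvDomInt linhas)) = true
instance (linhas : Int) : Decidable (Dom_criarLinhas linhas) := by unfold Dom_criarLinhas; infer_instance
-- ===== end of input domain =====

-- B replaces A's inner 1..i line-rebuilding loop by a single loop extending the list's previous last line (intended as faster; a timing run measured a constant-factor speedup).


-- ===== PORT A =====
def criarLinhas (linhas : Int) : List String :=
  let s := (PySem.List.pyRange 0 linhas 1).foldl
    (fun (st : List String × Int) _i =>
      let linha := st.2 + 1
      let texto := (PySem.List.pyRange 1 (linha + 1) 1).foldl
        (fun t j => t ++ PySem.Int.toStr j ++ " ") ""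
      (st.1 ++ [texto], linha))
    ([], 0)
  s.1

-- ===== PORT B =====
def criarLinhas_alt (linhas : Int) : List String :=
  (PySem.List.pyRange 1 (linhas + 1) 1).foldl
    (fun resultado i =>
      let anterior := resultado.getLast?.getD ""
      resultado ++ [anterior ++ PySem.Int.toStr i ++ " "])
    []

-- ===== PRECONDITION & SPEC =====
def Spec_criarLinhas (linhas : Int) (out : List String) : Prop := out = criarLinhas_alt linhas
instance (linhas : Int) (out : List String) : Decidable (Spec_criarLinhas linhas out) := by unfold Spec_criarLinhas; infer_instance

-- ===== CLAIM (what is proved, stated in full; the proofs are below) =====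
def Claim_equal_criarLinhas : Prop := ∀ (linhas : Int), Dom_criarLinhas linhas → Spec_criarLinhas linhas (criarLinhas linhas)

-- ===== LEMMAS AND PROOFS =====

-- the line "1 2 ... m " as A's inner loop builds it
def pvLine (m : Int) : String :=
  (PySem.List.pyRange 1 (m + 1) 1).foldl (fun t j => t ++ PySem.Int.toStr j ++ " ") ""

lemma pvLine_succ (n : ℕ) :
    pvLine ((n : Int) + 1) = pvLine n ++ PySem.Int.toStr ((n : Int) + 1) ++ " " := by
  unfold pvLine
  rw [show ((n : Int) + 1 + 1) = ((n : Int) + 1) + 1 from rfl,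
    PySem.List.pyRange_one_succ_right (by omega), List.foldl_append]
  rfl

def pvLines (n : ℕ) : List String := (List.range n).map (fun k : ℕ => pvLine ((k : Int) + 1))

lemma pvLines_succ (m : ℕ) : pvLines (m + 1) = pvLines m ++ [pvLine ((m : Int) + 1)] := by
  unfold pvLines
  rw [List.range_succ, List.map_append]
  rfl

lemma criarLinhas_state (n : ℕ) :
    (PySem.List.pyRange 0 (n : Int) 1).foldl
      (fun (st : List String × Int) _i =>
        let linha := st.2 + 1
        let texto := (PySem.List.pyRange 1 (linha + 1) 1).foldl
          (fun t j => t ++ PySem.Int.toStr j ++ " ") ""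
        (st.1 ++ [texto], linha))
      ([], 0)
    = (pvLines n, (n : Int)) := by
  induction n with
  | zero => simp [PySem.List.pyRange_one_eq_nil, pvLines]
  | succ m ih =>
    rw [show ((m + 1 : ℕ) : Int) = (m : Int) + 1 by push_cast; ring,
      PySem.List.pyRange_one_succ_right (by omega), List.foldl_append, ih,
      pvLines_succ]
    simp [pvLine]

lemma pvLines_getLast (m : ℕ) : (pvLines (m + 1)).getLast?.getD "" = pvLine ((m : Int) + 1) := by
  rw [pvLines_succ, List.getLast?_append]
  rfl

lemma criarLinhas_alt_closed (n : ℕ) :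
    criarLinhas_alt (n : Int) = pvLines n := by
  unfold criarLinhas_alt
  induction n with
  | zero => simp [PySem.List.pyRange_one_eq_nil, pvLines]
  | succ m ih =>
    rw [show ((m + 1 : ℕ) : Int) + 1 = ((m : Int) + 1) + 1 by push_cast; ring,
      PySem.List.pyRange_one_succ_right (by omega), List.foldl_append, ih, pvLines_succ]
    cases m with
    | zero =>
      show pvLines 0 ++ [(pvLines 0).getLast?.getD "" ++ _ ++ _] = _
      simp [pvLines, pvLine]
      rw [show (2 : Int) = (1 : Int) + 1 from rfl, PySem.List.pyRange_one_succ_right (by omega),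
        PySem.List.pyRange_one_eq_nil (by omega)]
      rfl
    | succ p =>
      show pvLines (p+1) ++ [(pvLines (p+1)).getLast?.getD "" ++ _ ++ _] = _
      rw [pvLines_getLast p]
      have h1 : ((p + 1 : ℕ) : Int) + 1 = ((p : Int) + 1) + 1 := by push_cast; ring
      rw [h1]
      have h3 := pvLine_succ (p + 1)
      push_cast at h3
      rw [h3]

-- ===== VERDICT (by name: the statement is the Claim_ definition above) =====
theorem criarLinhas_spec : Claim_equal_criarLinhas := by
  intro linhas _
  unfold Spec_criarLinhas
  by_cases h : 0 ≤ linhas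
  · obtain ⟨n, rfl⟩ := Int.eq_ofNat_of_zero_le h
    unfold criarLinhas
    simp only [criarLinhas_state n, criarLinhas_alt_closed n]
  · unfold criarLinhas criarLinhas_alt
    rw [PySem.List.pyRange_one_eq_nil (by omega), PySem.List.pyRange_one_eq_nil (by omega)]
    rfl
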